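-- pv_equiv track=rewrite | github.com/lapssh/codder_learning | courses/stepik/python/016_matrix_around.py | matrix_operation
-- ===== SOURCE A (Python) =====
-- def matrix_operation(matrix, matrix2):
--     end = len(matrix) - 1
--     for i in range(0, len(matrix)):
--         for j in range(0, len(matrix)):
--             if i == end and j == end:
--                 matrix2[i][j] = int(matrix[i - 1][j]) + int(matrix[0][j]) + int(matrix[i][j - 1]) + int(matrix[i][0])
--             elif j == end:
--                 matrix2[i][j] = int(matrix[i - 1][j]) + int(matrix[i + 1][j]) + int(matrix[i][j - 1]) + int(
--                     matrix[i][0])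
--             elif i == end:
--                 matrix2[i][j] = int(matrix[i - 1][j]) + int(matrix[0][j]) + int(matrix[i][j - 1]) + int(
--                     matrix[i][j + 1])
--             else:
--                 matrix2[i][j] = int(matrix[i - 1][j]) + int(matrix[i + 1][j]) + int(matrix[i][j - 1]) + int(
--                     matrix[i][j + 1])
--     return matrix2
-- ===== SOURCE B (Python) =====
-- def matrix_operation(matrix, matrix2):
--     # Mutates matrix2 in place (like the original) and returns it.
--     if not matrix:
--         return matrix2
--     n = len(matrix)
--     up_rows = [matrix[-1]] + matrix[:-1]      # up_rows[i] is matrix[i-1] with wraparound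
--     down_rows = matrix[1:] + [matrix[0]]      # down_rows[i] is matrix[i+1] with wraparound
--     for i in range(n):
--         row = matrix[i]
--         left = [row[-1]] + row[:-1]           # left[j] is row[j-1] with wraparound
--         right = row[1:] + [row[0]]            # right[j] is row[j+1] with wraparound
--         up, down, row2 = up_rows[i], down_rows[i], matrix2[i]
--         for j in range(n):
--             row2[j] = int(up[j]) + int(down[j]) + int(left[j]) + int(right[j])
--     return matrix2
-- ===== Notes on version B (the rewrite author's own statement) =====
-- stated objective: alternative
-- what changed: Replaces the four-way boundary-branch cascade inside the nested loops by precomputed wrapped-shift grids (up/down row lists and left/right rotations of each row) combined in one uniform branch-free summation pass.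
-- outside the precondition, e.g. on matrix_operation([['1', '2']], [[0]]): A returns [[5]], B returns [[6]]
import Mathlib
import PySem

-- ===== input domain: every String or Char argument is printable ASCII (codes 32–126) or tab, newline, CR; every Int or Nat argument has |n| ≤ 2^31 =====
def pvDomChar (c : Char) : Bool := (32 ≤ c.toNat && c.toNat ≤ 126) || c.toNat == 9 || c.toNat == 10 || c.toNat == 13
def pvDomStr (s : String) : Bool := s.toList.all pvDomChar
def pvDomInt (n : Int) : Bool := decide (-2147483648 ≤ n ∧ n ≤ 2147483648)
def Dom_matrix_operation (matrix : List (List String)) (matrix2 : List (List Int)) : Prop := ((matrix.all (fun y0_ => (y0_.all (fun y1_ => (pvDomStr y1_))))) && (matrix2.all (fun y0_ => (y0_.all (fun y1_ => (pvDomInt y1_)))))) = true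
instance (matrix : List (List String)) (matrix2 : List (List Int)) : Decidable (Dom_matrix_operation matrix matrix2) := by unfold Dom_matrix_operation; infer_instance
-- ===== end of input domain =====

-- B replaces A's boundary-branch cascade by precomputed wrapped-shift grids combined in one
-- uniform summation pass; both mutate matrix2 in place in Python, the theorem is about the
-- returned value (which is that mutated matrix2).

-- ===== PORT A =====
-- int(matrix[i][j]) with Python indexing; the default 0 is never used inside Pre_ (all parses succeed, indices in range)
def pvAt (m : List (List String)) (i j : Int) : Int :=
  (PySem.Int.ofStr? (PySem.List.pyGetD (PySem.List.pyGetD m i []) j "")).getD 0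

-- matrix2[i][j] = v (i, j nonneg and in range under Pre_)
def pvSetCell (m2 : List (List Int)) (i j : Int) (v : Int) : List (List Int) :=
  m2.set i.toNat ((m2.getD i.toNat []).set j.toNat v)

def matrix_operation (matrix : List (List String)) (matrix2 : List (List Int)) : List (List Int) :=
  let n : Int := matrix.length
  let e : Int := n - 1
  (PySem.List.pyRange 0 n 1).foldl (fun m2 i =>
    (PySem.List.pyRange 0 n 1).foldl (fun m2 j =>
      pvSetCell m2 i j (
        if i = e ∧ j = e then
          pvAt matrix (i-1) j + pvAt matrix 0 j + pvAt matrix i (j-1) + pvAt matrix i 0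
        else if j = e then
          pvAt matrix (i-1) j + pvAt matrix (i+1) j + pvAt matrix i (j-1) + pvAt matrix i 0
        else if i = e then
          pvAt matrix (i-1) j + pvAt matrix 0 j + pvAt matrix i (j-1) + pvAt matrix i (j+1)
        else
          pvAt matrix (i-1) j + pvAt matrix (i+1) j + pvAt matrix i (j-1) + pvAt matrix i (j+1))) m2)
    matrix2

-- ===== PORT B =====
-- int(s); the default 0 is never used inside Pre_
def pvIntB (s : String) : Int := (PySem.Int.ofStr? s).getD 0

def matrix_operation_alt (matrix : List (List String)) (matrix2 : List (List Int)) : List (List Int) :=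
  if matrix = [] then matrix2 else
  let n : Int := matrix.length
  let up_rows := PySem.List.pyGetD matrix (-1) [] :: PySem.List.slice matrix none (some (-1))
  let down_rows := PySem.List.slice matrix (some 1) none ++ [PySem.List.pyGetD matrix 0 []]
  (PySem.List.pyRange 0 n 1).foldl (fun m2 i =>
    let row := PySem.List.pyGetD matrix i []
    let left := PySem.List.pyGetD row (-1) "" :: PySem.List.slice row none (some (-1))
    let right := PySem.List.slice row (some 1) none ++ [PySem.List.pyGetD row 0 ""]
    let up := PySem.List.pyGetD up_rows i []
    let down := PySem.List.pyGetD down_rows i []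
    let row2 := m2.getD i.toNat []
    m2.set i.toNat ((PySem.List.pyRange 0 n 1).foldl (fun r j =>
      r.set j.toNat (pvIntB (PySem.List.pyGetD up j "") + pvIntB (PySem.List.pyGetD down j "")
        + pvIntB (PySem.List.pyGetD left j "") + pvIntB (PySem.List.pyGetD right j ""))) row2))
    matrix2

-- ===== PRECONDITION & SPEC =====
-- Pre_ restricts to the task's natural domain: matrix is a square n×n grid of int-parseable
-- strings (A raises ValueError/IndexError on unparseable entries or too-short rows; on ragged
-- matrices with over-long rows A still returns, mixing wrapped and out-of-square neighbours —
-- excluded as outside the square-grid domain), and matrix2 has at least n rows each of length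
-- at least n (else A raises IndexError on assignment).
def Pre_matrix_operation (matrix : List (List String)) (matrix2 : List (List Int)) : Prop :=
  ((matrix.all (fun row => row.length == matrix.length
      && row.all (fun s => (PySem.Int.ofStr? s).isSome)))
   && matrix.length ≤ matrix2.length
   && (matrix2.take matrix.length).all (fun row => matrix.length ≤ row.length)) = true
instance (matrix : List (List String)) (matrix2 : List (List Int)) : Decidable (Pre_matrix_operation matrix matrix2) := by unfold Pre_matrix_operation; infer_instance

def pvWitness_matrix_operation : List (List String) × List (List Int) :=
  ([["1", "2"], ["3", "4"]], [[0, 0], [0, 0]])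

def Spec_matrix_operation (matrix : List (List String)) (matrix2 : List (List Int)) (out : List (List Int)) : Prop := out = matrix_operation_alt matrix matrix2
instance (matrix : List (List String)) (matrix2 : List (List Int)) (out : List (List Int)) : Decidable (Spec_matrix_operation matrix matrix2 out) := by unfold Spec_matrix_operation; infer_instance

-- ===== CLAIM (what is proved, stated in full; the proofs are below) =====
def Claim_equal_matrix_operation : Prop := ∀ (matrix : List (List String)) (matrix2 : List (List Int)), Dom_matrix_operation matrix matrix2 → Pre_matrix_operation matrix matrix2 → Spec_matrix_operation matrix matrix2 (matrix_operation matrix matrix2)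

-- ===== LEMMAS AND PROOFS =====

-- Writing matrix2[i][j] = v for each j in turn equals updating row i once with all the writes.
lemma pvL0 (js : List Int) (m2 : List (List Int)) (iN : Nat) (v : Int → Int)
    (h : m2.length ≤ iN) :
  js.foldl (fun acc j => acc.set iN ((acc.getD iN []).set j.toNat (v j))) m2 = m2 := by
  induction js with
  | nil => rfl
  | cons j js ih => rw [List.foldl_cons, List.set_eq_of_length_le h]; exact ih

lemma pvL1 (js : List Int) (m2 : List (List Int)) (iN : Nat) (v : Int → Int) :
  js.foldl (fun acc j => acc.set iN ((acc.getD iN []).set j.toNat (v j))) m2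
  = m2.set iN (js.foldl (fun r j => r.set j.toNat (v j)) (m2.getD iN [])) := by
  induction js generalizing m2 with
  | nil =>
    simp only [List.foldl_nil]
    by_cases h : iN < m2.length
    · rw [List.getD_eq_getElem _ _ h, List.set_getElem_self]
    · rw [List.set_eq_of_length_le (by omega)]
  | cons j js ih =>
    by_cases h : iN < m2.length
    · simp only [List.foldl_cons]
      rw [ih, List.set_set]
      congr 1
      rw [List.getD_eq_getElem _ _ (by simpa using h), List.getElem_set_self,
          List.getD_eq_getElem _ _ h]
    · have hle : m2.length ≤ iN := by omega
      rw [pvL0 _ _ _ _ hle, List.set_eq_of_length_le hle]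

-- ([xs[-1]] + xs[:-1])[i] is xs[i-1] (Python indexing, wraparound at 0)
lemma pv_rotR {α : Type} (xs : List α) (d : α) (i : Int)
    (h0 : 0 ≤ i) (hn : i < xs.length) :
  PySem.List.pyGetD (PySem.List.pyGetD xs (-1) d :: PySem.List.slice xs none (some (-1))) i d
  = PySem.List.pyGetD xs (i - 1) d := by
  obtain ⟨k, rfl⟩ : ∃ k : Nat, i = (k : Int) := ⟨i.toNat, (Int.toNat_of_nonneg h0).symm⟩
  cases k with
  | zero => simp
  | succ m =>
    have hm : m < xs.length - 1 := by omega
    rw [PySem.List.slice_to_neg_one]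
    rw [show (((m + 1 : Nat) : Int)) - 1 = (((m : Nat) : Int)) by push_cast; ring]
    rw [PySem.List.pyGetD_natCast, PySem.List.pyGetD_natCast]
    rw [List.getD_cons_succ]
    rw [List.getD_eq_getElem _ _ (by simpa using hm),
        List.getD_eq_getElem _ _ (by omega)]
    simp [List.getElem_dropLast]

-- (xs[1:] + [xs[0]])[i] is xs[i+1], wrapping to xs[0] at the right edge
lemma pv_rotL {α : Type} (xs : List α) (d : α) (i : Int)
    (h0 : 0 ≤ i) (hn : i < xs.length) :
  PySem.List.pyGetD (PySem.List.slice xs (some 1) none ++ [PySem.List.pyGetD xs 0 d]) i d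
  = PySem.List.pyGetD xs (if i = (xs.length : Int) - 1 then 0 else i + 1) d := by
  obtain ⟨k, rfl⟩ : ∃ k : Nat, i = (k : Int) := ⟨i.toNat, (Int.toNat_of_nonneg h0).symm⟩
  rw [PySem.List.slice_from_one]
  by_cases hk : k = xs.length - 1
  · rw [if_pos (by omega)]
    subst hk
    rw [PySem.List.pyGetD_natCast]
    rw [List.getD_eq_getElem _ _ (by simp)]
    rw [List.getElem_append_right (by simp)]
    simp [PySem.List.pyGetD_zero]
  · have hlt : k < xs.length - 1 := by omega
    rw [if_neg (by omega)]
    rw [show ((k : Int) + 1) = (((k + 1 : Nat) : Int)) by push_cast; ring]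
    rw [PySem.List.pyGetD_natCast, PySem.List.pyGetD_natCast]
    rw [List.getD_eq_getElem _ _ (by simp; omega),
        List.getD_eq_getElem _ _ (by omega)]
    rw [List.getElem_append_left (by simp; omega)]
    exact List.getElem_tail _

-- ===== VERDICT (by name: the statement is the Claim_ definition above) =====
theorem matrix_operation_spec : Claim_equal_matrix_operation := by
  intro matrix matrix2 _dom hpre
  unfold Spec_matrix_operation
  have hsq : ∀ row ∈ matrix, row.length = matrix.length := by
    simp only [Pre_matrix_operation, Bool.and_eq_true, List.all_eq_true, beq_iff_eq,
      decide_eq_true_eq] at hpre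
    exact fun row hr => (hpre.1.1 row hr).1
  by_cases hne : matrix = []
  · subst hne
    simp [matrix_operation, matrix_operation_alt]
  · simp only [matrix_operation, matrix_operation_alt, if_neg hne]
    symm
    apply PySem.List.foldl_congr_mem'
    intro i hi m2
    obtain ⟨h0i, hin⟩ := (PySem.List.mem_pyRange_one).mp hi
    have hrow_mem : PySem.List.pyGetD matrix i [] ∈ matrix :=
      PySem.List.pyGetD_mem matrix [] (by unfold PySem.Raise.InRange; omega)
    have hrowlen : (PySem.List.pyGetD matrix i []).length = matrix.length :=
      hsq _ hrow_mem
    simp only [pvSetCell]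
    rw [pvL1]
    congr 1
    apply PySem.List.foldl_congr_mem'
    intro j hj r
    obtain ⟨h0j, hjn⟩ := (PySem.List.mem_pyRange_one).mp hj
    congr 1
    rw [pv_rotR matrix [] i h0i (by exact_mod_cast hin),
        pv_rotL matrix [] i h0i (by exact_mod_cast hin),
        pv_rotR (PySem.List.pyGetD matrix i []) "" j h0j
          (by rw [hrowlen]; exact_mod_cast hjn),
        pv_rotL (PySem.List.pyGetD matrix i []) "" j h0j
          (by rw [hrowlen]; exact_mod_cast hjn),
        hrowlen]
    simp only [pvAt, pvIntB]
    by_cases hie : i = (matrix.length : Int) - 1 <;>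
      by_cases hje : j = (matrix.length : Int) - 1 <;>
      simp [hie, hje]
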